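-- pv_equiv track=rewrite | github.com/sushil-negi/mlops-project | models/healthcare-ai/src/healthcare_trained_engine.py | _is_crisis
-- ===== SOURCE A (Python) =====
-- def _is_crisis(text: str) -> bool:
--     """Check if the message indicates a crisis"""
--     crisis_words = [
--         "suicide",
--         "kill myself",
--         "hurt myself",
--         "want to die",
--         "end it all",
--         "harm myself",
--     ]
--     text_lower = text.lower()
--     return any(word in text_lower for word in crisis_words)
-- ===== SOURCE B (Python) =====
-- def _is_crisis(text: str) -> bool:
--     phrases = (
--         "suicide",
--         "kill myself",
--         "hurt myself",
--         "want to die",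
--         "end it all",
--         "harm myself",
--     )
--     t = text.lower()
--     # single left-to-right scan: at each position, does any phrase start here?
--     return any(
--         t.startswith(p, i) for i in range(len(t) + 1) for p in phrases
--     )
-- ===== Notes on version B (the rewrite author's own statement) =====
-- stated objective: alternative
-- what changed: A searches the lowered text once per crisis phrase with six separate substring searches; B makes a single left-to-right scan over positions of the lowered text, testing at each position whether any phrase starts there (startswith with offset), so the phrase loop moves inside one positional pass.
import Mathlib
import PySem

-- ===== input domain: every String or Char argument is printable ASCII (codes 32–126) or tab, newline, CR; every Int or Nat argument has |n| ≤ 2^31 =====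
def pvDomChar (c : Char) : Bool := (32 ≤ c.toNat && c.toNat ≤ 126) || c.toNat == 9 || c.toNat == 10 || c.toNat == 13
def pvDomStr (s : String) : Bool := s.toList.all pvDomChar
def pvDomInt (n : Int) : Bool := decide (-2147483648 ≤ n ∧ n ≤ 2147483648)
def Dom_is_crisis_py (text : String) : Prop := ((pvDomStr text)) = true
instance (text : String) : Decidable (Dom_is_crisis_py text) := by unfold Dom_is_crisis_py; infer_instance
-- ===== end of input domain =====

-- B replaces A's per-phrase substring searches by one left-to-right scan over positions,
-- testing each fixed phrase as a prefix at each position (objective: alternative).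

-- ===== PORT A =====
def is_crisis_py (text : String) : Bool :=
  let crisis_words : List String :=
    ["suicide", "kill myself", "hurt myself", "want to die", "end it all", "harm myself"]
  let text_lower := PySem.Str.lower text
  crisis_words.any (fun word => PySem.Str.isIn word text_lower)

-- ===== PORT B =====
-- t.startswith(p, i) with 0 ≤ i ≤ len(t) is exactly 'p is a prefix of t[i:]'.
def is_crisis_py_alt (text : String) : Bool :=
  let phrases : List (List Char) :=
    ["suicide".toList, "kill myself".toList, "hurt myself".toList,
     "want to die".toList, "end it all".toList, "harm myself".toList]
  let t := PySem.Chars.lower text.toList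
  (List.range (t.length + 1)).any (fun i =>
    phrases.any (fun p => PySem.Chars.startswith (t.drop i) p))

-- ===== PRECONDITION & SPEC =====
def Spec_is_crisis_py (text : String) (out : Bool) : Prop := out = is_crisis_py_alt text
instance (text : String) (out : Bool) : Decidable (Spec_is_crisis_py text out) := by unfold Spec_is_crisis_py; infer_instance

-- ===== CLAIM (what is proved, stated in full; the proofs are below) =====
def Claim_equal_is_crisis_py : Prop := ∀ (text : String), Dom_is_crisis_py text → Spec_is_crisis_py text (is_crisis_py text)

-- ===== LEMMAS AND PROOFS =====

-- a phrase occurs as an infix iff it is a prefix at some position 0..len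
lemma infix_iff_prefix_at (t w : List Char) :
    w <:+: t ↔ ∃ i < t.length + 1, w <+: t.drop i := by
  constructor
  · intro h
    have : ∃ j, w <+: t.drop j :=
      (PySem.Chars.exists_prefix_drop_iff_isIn w t).mpr
        ((PySem.Chars.isIn_iff_infix w t).mpr h)
    obtain ⟨j, hj⟩ := this
    by_cases hle : j ≤ t.length
    · exact ⟨j, by omega, hj⟩
    · refine ⟨t.length, by omega, ?_⟩
      have hnil : t.drop j = [] := List.drop_eq_nil_of_le (by omega)
      have : w = [] := List.prefix_nil.mp (hnil ▸ hj)
      simp [this]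
  · rintro ⟨i, _, hp⟩
    exact (PySem.Chars.isIn_iff_infix w t).mp
      ((PySem.Chars.exists_prefix_drop_iff_isIn w t).mp ⟨i, hp⟩)

-- exchanging the two searches: per-phrase substring search = per-position prefix test
lemma scan_eq_search (t : List Char) (ws : List (List Char)) :
    (List.range (t.length + 1)).any (fun i =>
      ws.any (fun p => PySem.Chars.startswith (t.drop i) p))
    = ws.any (fun p => PySem.Chars.isIn p t) := by
  rw [Bool.eq_iff_iff]
  simp only [List.any_eq_true, List.mem_range, PySem.Chars.isIn_iff_infix,
    PySem.Chars.startswith_iff, infix_iff_prefix_at]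
  constructor
  · rintro ⟨i, hi, p, hp, hsw⟩
    exact ⟨p, hp, i, hi, hsw⟩
  · rintro ⟨p, hp, i, hi, hsw⟩
    exact ⟨i, hi, p, hp, hsw⟩

-- ===== VERDICT (by name: the statement is the Claim_ definition above) =====
theorem is_crisis_py_spec : Claim_equal_is_crisis_py := by
  intro text _
  unfold Spec_is_crisis_py is_crisis_py is_crisis_py_alt
  simp only [scan_eq_search, PySem.Str.isIn_eq, PySem.Str.toList_lower]
  simp [List.any]
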